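-- pv_equiv track=rewrite | github.com/damionrashford/llms-txt-generator-mcp | src/utils/sitemap_extractor.py | _categorize_urls
-- ===== SOURCE A (Python) =====
-- from typing import Any, Dict, List, Optional, Set
--
-- def _categorize_urls(urls: List[str]) -> Dict[str, List[str]]:
--     """Categorize URLs by type."""
--     categories = {
--         "documentation": [],
--         "api": [],
--         "guides": [],
--         "tutorials": [],
--         "blog": [],
--         "other": [],
--     }
--
--     for url in urls:
--         url_lower = url.lower()
--
--         if any(
--             pattern in url_lower
--             for pattern in ["/docs/", "/documentation/", "/guide/"]
--         ):
--             categories["documentation"].append(url)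
--         elif any(pattern in url_lower for pattern in ["/api/", "/reference/"]):
--             categories["api"].append(url)
--         elif any(pattern in url_lower for pattern in ["/guides/", "/how-to/"]):
--             categories["guides"].append(url)
--         elif any(pattern in url_lower for pattern in ["/tutorial/", "/tutorials/"]):
--             categories["tutorials"].append(url)
--         elif any(
--             pattern in url_lower for pattern in ["/blog/", "/news/", "/articles/"]
--         ):
--             categories["blog"].append(url)
--         else:
--             categories["other"].append(url)
--
--     return categories
-- ===== SOURCE B (Python) =====
-- _TABLE = [
--     ("documentation", ["/docs/", "/documentation/", "/guide/"]),
--     ("api", ["/api/", "/reference/"]),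
--     ("guides", ["/guides/", "/how-to/"]),
--     ("tutorials", ["/tutorial/", "/tutorials/"]),
--     ("blog", ["/blog/", "/news/", "/articles/"]),
-- ]
--
--
-- def _classify(url):
--     low = url.lower()
--     for cat, pats in _TABLE:
--         if any(p in low for p in pats):
--             return cat
--     return "other"
--
--
-- def _categorize_urls(urls):
--     cats = [c for c, _ in _TABLE] + ["other"]
--     return {c: [u for u in urls if _classify(u) == c] for c in cats}
-- ===== Notes on version B (the rewrite author's own statement) =====
-- stated objective: alternative
-- what changed: Replaces the hardcoded if/elif branch chain that appends into a pre-built dict with a data-driven priority table: a _classify helper scans the (category, patterns) table for the first match, and the result dict is built by a per-category comprehension filtering the urls (one filter pass per category instead of one append pass).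
import Mathlib
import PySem

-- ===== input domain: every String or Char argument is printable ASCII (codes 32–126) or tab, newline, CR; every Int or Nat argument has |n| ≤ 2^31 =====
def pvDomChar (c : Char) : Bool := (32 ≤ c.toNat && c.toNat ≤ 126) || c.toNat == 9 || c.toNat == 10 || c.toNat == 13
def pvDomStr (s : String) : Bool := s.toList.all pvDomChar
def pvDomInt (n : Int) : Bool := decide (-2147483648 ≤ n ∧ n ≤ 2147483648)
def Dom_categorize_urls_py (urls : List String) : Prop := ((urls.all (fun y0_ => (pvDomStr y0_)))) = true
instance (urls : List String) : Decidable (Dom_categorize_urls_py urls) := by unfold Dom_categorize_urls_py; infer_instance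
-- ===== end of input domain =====

-- B replaces A's if/elif chain with a priority table scanned by a classify helper and a per-category filter (alternative decomposition, same cost).

-- ===== PORT A =====
-- one loop step of A's 'for url in urls' over the categories dict
def pvCatAStep (d : PySem.Dict String (List String)) (url : String) : PySem.Dict String (List String) :=
  -- url_lower is recomputed inline (Python binds it once; the value is identical)
  if (["/docs/", "/documentation/", "/guide/"] : List String).any (fun p => PySem.Str.isIn p (PySem.Str.lower url)) then
    d.modify "documentation" [] (· ++ [url])
  else if (["/api/", "/reference/"] : List String).any (fun p => PySem.Str.isIn p (PySem.Str.lower url)) then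
    d.modify "api" [] (· ++ [url])
  else if (["/guides/", "/how-to/"] : List String).any (fun p => PySem.Str.isIn p (PySem.Str.lower url)) then
    d.modify "guides" [] (· ++ [url])
  else if (["/tutorial/", "/tutorials/"] : List String).any (fun p => PySem.Str.isIn p (PySem.Str.lower url)) then
    d.modify "tutorials" [] (· ++ [url])
  else if (["/blog/", "/news/", "/articles/"] : List String).any (fun p => PySem.Str.isIn p (PySem.Str.lower url)) then
    d.modify "blog" [] (· ++ [url])
  else
    d.modify "other" [] (· ++ [url])

def categorize_urls_py (urls : List String) : List (String × List String) :=
  let categories : PySem.Dict String (List String) :=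
    PySem.Dict.ofList [("documentation", []), ("api", []), ("guides", []),
                       ("tutorials", []), ("blog", []), ("other", [])]
  (urls.foldl pvCatAStep categories).items

-- ===== PORT B =====
def pvTable : List (String × List String) :=
  [("documentation", ["/docs/", "/documentation/", "/guide/"]),
   ("api", ["/api/", "/reference/"]),
   ("guides", ["/guides/", "/how-to/"]),
   ("tutorials", ["/tutorial/", "/tutorials/"]),
   ("blog", ["/blog/", "/news/", "/articles/"])]

-- B's 'for cat, pats in _TABLE: … return cat' loop
def pvClassifyGo (low : String) : List (String × List String) → String
  | [] => "other"
  | (cat, pats) :: rest =>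
      if pats.any (fun p => PySem.Str.isIn p low) then cat else pvClassifyGo low rest

def pvClassify (url : String) : String := pvClassifyGo (PySem.Str.lower url) pvTable

def categorize_urls_py_alt (urls : List String) : List (String × List String) :=
  (pvTable.map Prod.fst ++ ["other"]).map
    (fun c => (c, urls.filter (fun u => pvClassify u == c)))

-- ===== PRECONDITION & SPEC =====
def Spec_categorize_urls_py (urls : List String) (out : List (String × List String)) : Prop := out = categorize_urls_py_alt urls
instance (urls : List String) (out : List (String × List String)) : Decidable (Spec_categorize_urls_py urls out) := by unfold Spec_categorize_urls_py; infer_instance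

-- ===== CLAIM (what is proved, stated in full; the proofs are below) =====
def Claim_equal_categorize_urls_py : Prop := ∀ (urls : List String), Dom_categorize_urls_py urls → Spec_categorize_urls_py urls (categorize_urls_py urls)

-- ===== LEMMAS AND PROOFS =====

-- the six-key dict A maintains, with symbolic per-category lists
def pvMkD (a1 a2 a3 a4 a5 a6 : List String) : PySem.Dict String (List String) :=
  PySem.Dict.mk [("documentation", a1), ("api", a2), ("guides", a3),
                 ("tutorials", a4), ("blog", a5), ("other", a6)]

theorem pvMod1 (a1 a2 a3 a4 a5 a6 : List String) (f : List String → List String) :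
    (pvMkD a1 a2 a3 a4 a5 a6).modify "documentation" [] f = pvMkD (f a1) a2 a3 a4 a5 a6 := rfl
theorem pvMod2 (a1 a2 a3 a4 a5 a6 : List String) (f : List String → List String) :
    (pvMkD a1 a2 a3 a4 a5 a6).modify "api" [] f = pvMkD a1 (f a2) a3 a4 a5 a6 := rfl
theorem pvMod3 (a1 a2 a3 a4 a5 a6 : List String) (f : List String → List String) :
    (pvMkD a1 a2 a3 a4 a5 a6).modify "guides" [] f = pvMkD a1 a2 (f a3) a4 a5 a6 := rfl
theorem pvMod4 (a1 a2 a3 a4 a5 a6 : List String) (f : List String → List String) :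
    (pvMkD a1 a2 a3 a4 a5 a6).modify "tutorials" [] f = pvMkD a1 a2 a3 (f a4) a5 a6 := rfl
theorem pvMod5 (a1 a2 a3 a4 a5 a6 : List String) (f : List String → List String) :
    (pvMkD a1 a2 a3 a4 a5 a6).modify "blog" [] f = pvMkD a1 a2 a3 a4 (f a5) a6 := rfl
theorem pvMod6 (a1 a2 a3 a4 a5 a6 : List String) (f : List String → List String) :
    (pvMkD a1 a2 a3 a4 a5 a6).modify "other" [] f = pvMkD a1 a2 a3 a4 a5 (f a6) := rfl

-- one step of A's loop on the six-key dict, expressed through B's classifier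
theorem pvStep (u : String) (a1 a2 a3 a4 a5 a6 : List String) :
    pvCatAStep (pvMkD a1 a2 a3 a4 a5 a6) u =
    pvMkD (a1 ++ List.filter (fun x => pvClassify x == "documentation") [u])
          (a2 ++ List.filter (fun x => pvClassify x == "api") [u])
          (a3 ++ List.filter (fun x => pvClassify x == "guides") [u])
          (a4 ++ List.filter (fun x => pvClassify x == "tutorials") [u])
          (a5 ++ List.filter (fun x => pvClassify x == "blog") [u])
          (a6 ++ List.filter (fun x => pvClassify x == "other") [u]) := by
  unfold pvCatAStep
  split_ifs with h1 h2 h3 h4 h5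
  · have hc : pvClassify u = "documentation" := by
      simp only [pvClassify, pvTable, pvClassifyGo, if_pos h1]
    rw [pvMod1]; simp [pvMkD, hc]
  · have hc : pvClassify u = "api" := by
      simp only [pvClassify, pvTable, pvClassifyGo, if_neg h1, if_pos h2]
    rw [pvMod2]; simp [pvMkD, hc]
  · have hc : pvClassify u = "guides" := by
      simp only [pvClassify, pvTable, pvClassifyGo, if_neg h1, if_neg h2, if_pos h3]
    rw [pvMod3]; simp [pvMkD, hc]
  · have hc : pvClassify u = "tutorials" := by
      simp only [pvClassify, pvTable, pvClassifyGo, if_neg h1, if_neg h2, if_neg h3, if_pos h4]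
    rw [pvMod4]; simp [pvMkD, hc]
  · have hc : pvClassify u = "blog" := by
      simp only [pvClassify, pvTable, pvClassifyGo, if_neg h1, if_neg h2, if_neg h3, if_neg h4, if_pos h5]
    rw [pvMod5]; simp [pvMkD, hc]
  · have hc : pvClassify u = "other" := by
      simp only [pvClassify, pvTable, pvClassifyGo, if_neg h1, if_neg h2, if_neg h3, if_neg h4, if_neg h5]
    rw [pvMod6]; simp [pvMkD, hc]

-- invariant of A's fold: with arbitrary accumulated lists, folding appends exactly the urls B's classifier sends to each category
theorem pvCatA_invariant (urls : List String) (a1 a2 a3 a4 a5 a6 : List String) :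
    urls.foldl pvCatAStep (pvMkD a1 a2 a3 a4 a5 a6) =
    pvMkD (a1 ++ urls.filter (fun u => pvClassify u == "documentation"))
          (a2 ++ urls.filter (fun u => pvClassify u == "api"))
          (a3 ++ urls.filter (fun u => pvClassify u == "guides"))
          (a4 ++ urls.filter (fun u => pvClassify u == "tutorials"))
          (a5 ++ urls.filter (fun u => pvClassify u == "blog"))
          (a6 ++ urls.filter (fun u => pvClassify u == "other")) := by
  induction urls generalizing a1 a2 a3 a4 a5 a6 with
  | nil => simp
  | cons u rest ih =>
      rw [List.foldl_cons, pvStep, ih]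
      simp only [pvMkD, List.append_assoc, ← List.filter_append, List.singleton_append]

-- ===== VERDICT (by name: the statement is the Claim_ definition above) =====
theorem categorize_urls_py_spec : Claim_equal_categorize_urls_py := by
  intro urls _
  unfold Spec_categorize_urls_py categorize_urls_py categorize_urls_py_alt
  have hinit : PySem.Dict.ofList ([("documentation", ([] : List String)), ("api", []), ("guides", []),
      ("tutorials", []), ("blog", []), ("other", [])]) = pvMkD [] [] [] [] [] [] := by decide
  simp only [hinit, pvCatA_invariant]
  simp [pvMkD, pvTable]
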